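-- pv_equiv track=rewrite | github.com/abjugard/advent-of-code-2021 | src/santas_little_ocr_lib.py | set_to_grid
-- ===== SOURCE A (Python) =====
-- def set_to_grid(s, max_x, max_y):
--   result = []
--   for y in range(max_y + 1):
--     l = []
--     for x in range(max_x + 1):
--       l.append((x, y) in s)
--     result.append(l)
--   return result
-- ===== SOURCE B (Python) =====
-- def set_to_grid(s, max_x, max_y):
--   result = [[False] * (max_x + 1) for _ in range(max_y + 1)]
--   for (x, y) in s:
--     if 0 <= x <= max_x and 0 <= y <= max_y:
--       result[y][x] = True
--   return result
-- ===== Notes on version B (the rewrite author's own statement) =====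
-- stated objective: faster
-- what changed: Instead of scanning every grid cell and testing membership of (x,y) in s, B allocates a blank (max_y+1)x(max_x+1) grid once and scatters only the in-range points of s into it, removing the per-cell membership scan.
import Mathlib
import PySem

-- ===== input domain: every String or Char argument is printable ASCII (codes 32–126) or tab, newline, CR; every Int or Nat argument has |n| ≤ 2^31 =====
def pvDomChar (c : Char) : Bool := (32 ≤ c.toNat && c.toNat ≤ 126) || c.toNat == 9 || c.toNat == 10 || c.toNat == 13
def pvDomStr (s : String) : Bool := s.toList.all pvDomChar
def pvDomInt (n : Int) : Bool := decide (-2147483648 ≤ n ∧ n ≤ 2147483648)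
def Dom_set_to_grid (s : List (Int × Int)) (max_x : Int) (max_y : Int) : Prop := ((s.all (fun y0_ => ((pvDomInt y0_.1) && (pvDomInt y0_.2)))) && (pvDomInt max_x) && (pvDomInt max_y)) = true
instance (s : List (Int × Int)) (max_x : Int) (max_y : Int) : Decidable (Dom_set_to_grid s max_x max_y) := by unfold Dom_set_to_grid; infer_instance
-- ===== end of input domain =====

-- B replaces A's per-cell membership scan by allocating a blank grid once and
-- scattering the in-range points of s into it (equal return values; B mutates only its own fresh grid).

-- ===== PORT A =====
-- A: for each y in range(max_y+1), build a row by appending '(x, y) in s' for each x, append the row.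
def set_to_grid (s : List (Int × Int)) (max_x : Int) (max_y : Int) : List (List Bool) :=
  (PySem.List.pyRange 0 (max_y + 1) 1).foldl
    (fun result y =>
      result ++ [(PySem.List.pyRange 0 (max_x + 1) 1).foldl
        (fun l x => l ++ [decide ((x, y) ∈ s)]) []])
    []

-- ===== PORT B =====
-- B: blank (max_y+1) x (max_x+1) grid of False, then set result[y][x] := True for each in-range (x, y) in s.
def set_to_grid_alt (s : List (Int × Int)) (max_x : Int) (max_y : Int) : List (List Bool) :=
  s.foldl
    (fun result p =>
      if 0 ≤ p.1 ∧ p.1 ≤ max_x ∧ 0 ≤ p.2 ∧ p.2 ≤ max_y then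
        result.modify p.2.toNat (fun row => row.set p.1.toNat true)
      else result)
    (List.replicate (max_y + 1).toNat (List.replicate (max_x + 1).toNat false))

-- ===== PRECONDITION & SPEC =====
def Spec_set_to_grid (s : List (Int × Int)) (max_x : Int) (max_y : Int) (out : List (List Bool)) : Prop := out = set_to_grid_alt s max_x max_y
instance (s : List (Int × Int)) (max_x : Int) (max_y : Int) (out : List (List Bool)) : Decidable (Spec_set_to_grid s max_x max_y out) := by unfold Spec_set_to_grid; infer_instance

-- ===== CLAIM (what is proved, stated in full; the proofs are below) =====
def Claim_equal_set_to_grid : Prop := ∀ (s : List (Int × Int)) (max_x : Int) (max_y : Int), Dom_set_to_grid s max_x max_y → Spec_set_to_grid s max_x max_y (set_to_grid s max_x max_y)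

-- ===== LEMMAS AND PROOFS =====

-- an append-accumulating foldl is a map
theorem pv_foldl_append_map {α β : Type} (f : α → β) :
    ∀ (l : List α) (acc : List β),
      l.foldl (fun r y => r ++ [f y]) acc = acc ++ l.map f := by
  intro l
  induction l with
  | nil => simp
  | cons a t ih => intro acc; simp [List.foldl, ih]

-- modifying index k of a map over pyRange 0 N rewrites the function at the value k
theorem pv_modify_map_pyRange {α : Type} (f : Int → α) (N : Int) (k : Nat) (h : α → α) :
    ((PySem.List.pyRange 0 N 1).map f).modify k h
      = (PySem.List.pyRange 0 N 1).map (fun y => if y = (k : Int) then h (f y) else f y) := by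
  apply List.ext_getElem (by simp)
  intro i h1 h2
  have hlen : i < (PySem.List.pyRange 0 N 1).length := by simpa using h2
  simp only [List.getElem_modify, List.getElem_map,
    PySem.List.getElem_pyRange_one]
  have : ((0 : Int) + i = (k : Int)) ↔ (k = i) := by omega
  split_ifs with hk hk' hk' <;> simp_all

-- setting index k of a map over pyRange 0 N rewrites the function at the value k
theorem pv_set_map_pyRange {α : Type} (f : Int → α) (N : Int) (k : Nat) (v : α) :
    ((PySem.List.pyRange 0 N 1).map f).set k v
      = (PySem.List.pyRange 0 N 1).map (fun x => if x = (k : Int) then v else f x) := by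
  apply List.ext_getElem (by simp)
  intro i h1 h2
  have hlen : i < (PySem.List.pyRange 0 N 1).length := by simpa using h2
  simp only [List.getElem_set, List.getElem_map, PySem.List.getElem_pyRange_one]
  have : ((0 : Int) + i = (k : Int)) ↔ (k = i) := by omega
  split_ifs with hk hk' hk' <;> simp_all

-- scattering s into a functional grid OR-s membership into every cell
theorem pv_scatter_eq (max_x max_y : Int) :
    ∀ (s : List (Int × Int)) (g : Int → Int → Bool),
      s.foldl
        (fun result p =>
          if 0 ≤ p.1 ∧ p.1 ≤ max_x ∧ 0 ≤ p.2 ∧ p.2 ≤ max_y then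
            result.modify p.2.toNat (fun row => row.set p.1.toNat true)
          else result)
        ((PySem.List.pyRange 0 (max_y + 1) 1).map
          (fun y => (PySem.List.pyRange 0 (max_x + 1) 1).map (fun x => g x y)))
      = (PySem.List.pyRange 0 (max_y + 1) 1).map
          (fun y => (PySem.List.pyRange 0 (max_x + 1) 1).map
            (fun x => g x y || decide ((x, y) ∈ s))) := by
  intro s
  induction s with
  | nil => intro g; simp
  | cons p t ih =>
    intro g
    obtain ⟨a, b⟩ := p
    simp only [List.foldl]
    by_cases hg : 0 ≤ a ∧ a ≤ max_x ∧ 0 ≤ b ∧ b ≤ max_y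
    · rw [if_pos hg, pv_modify_map_pyRange]
      have hb : ((b.toNat : Int)) = b := Int.toNat_of_nonneg hg.2.2.1
      have ha : ((a.toNat : Int)) = a := Int.toNat_of_nonneg hg.1
      have hrw : (PySem.List.pyRange 0 (max_y + 1) 1).map
            (fun y => if y = (b.toNat : Int) then
                ((PySem.List.pyRange 0 (max_x + 1) 1).map (fun x => g x y)).set a.toNat true
              else (PySem.List.pyRange 0 (max_x + 1) 1).map (fun x => g x y))
          = (PySem.List.pyRange 0 (max_y + 1) 1).map
            (fun y => (PySem.List.pyRange 0 (max_x + 1) 1).map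
              (fun x => if x = a ∧ y = b then true else g x y)) := by
        apply List.map_congr_left
        intro y _
        rw [hb]
        by_cases hy : y = b
        · rw [if_pos hy, pv_set_map_pyRange, ha]
          apply List.map_congr_left
          intro x _
          by_cases hx : x = a <;> simp [hx, hy]
        · rw [if_neg hy]
          apply List.map_congr_left
          intro x _
          simp [hy]
      rw [hrw, ih]
      apply List.map_congr_left
      intro y _
      apply List.map_congr_left
      intro x _
      by_cases hx : x = a ∧ y = b
      · simp [hx.1, hx.2]
      · have : ¬ ((x, y) = (a, b)) := by simp [Prod.ext_iff]; tauto
        simp [hx, this]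
    · rw [if_neg hg, ih]
      apply List.map_congr_left
      intro y hy
      apply List.map_congr_left
      intro x hx
      rw [PySem.List.mem_pyRange_one] at hy hx
      have : ¬ ((x, y) = (a, b)) := by
        simp only [Prod.mk.injEq, not_and]
        intro hxa hyb; apply hg; omega
      simp [this]

-- ===== VERDICT (by name: the statement is the Claim_ definition above) =====
theorem set_to_grid_spec : Claim_equal_set_to_grid := by
  intro s max_x max_y _
  unfold Spec_set_to_grid set_to_grid set_to_grid_alt
  have hblank : List.replicate (max_y + 1).toNat (List.replicate (max_x + 1).toNat false)
      = (PySem.List.pyRange 0 (max_y + 1) 1).map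
          (fun y => (PySem.List.pyRange 0 (max_x + 1) 1).map
            (fun x => (fun (_ _ : Int) => false) x y)) := by
    have h1 : ∀ (N : Int) (c : List Bool),
        (PySem.List.pyRange 0 N 1).map (fun _ => c) = List.replicate N.toNat c := by
      intro N c
      rw [show (fun (_ : Int) => c) = Function.const Int c from rfl, List.map_const]
      simp
    have h0 : (PySem.List.pyRange 0 (max_x + 1) 1).map (fun (_ : Int) => false)
        = List.replicate (max_x + 1).toNat false := by
      rw [show (fun (_ : Int) => false) = Function.const Int false from rfl, List.map_const]
      simp
    simp only [h0]
    rw [h1]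
  rw [hblank, pv_scatter_eq]
  rw [pv_foldl_append_map]
  simp only [List.nil_append]
  apply List.map_congr_left
  intro y _
  rw [pv_foldl_append_map]
  simp
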